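-- pv_equiv track=rewrite | github.com/y24/TestProgressRecord | libs/DataAggregation.py | get_daily_by_name
-- ===== SOURCE A (Python) =====
-- from collections import defaultdict
--
-- def get_daily_by_name(data):
--     date_name_count = defaultdict(lambda: defaultdict(int))
--
--     # 日付が空の行は削除
--     data = [row for row in data if len(row) > 2 and row[2] not in ("", None)]
--
--     # 結果が空ではない行を日付および名前ごとにカウント
--     for row in data:
--         result, name, date = row
--         if result:  # 結果が空ではない場合
--             date_name_count[date][name] += 1
--
--     # 集計結果を返却
--     result = {}
--     for date, name_counts in sorted(date_name_count.items()):
--         daily_count = {}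
--         for name, count in sorted(name_counts.items()):
--             daily_count[name] = count
--         result[date] = daily_count
--     return result
-- ===== SOURCE B (Python) =====
-- def get_daily_by_name(data):
--     rows = [row for row in data if len(row) > 2 and row[2] not in ("", None)]
--     pairs = []
--     for row in rows:
--         result, name, date = row
--         if result:
--             pairs.append((date, name))
--     out = {}
--     for d in sorted(set(p[0] for p in pairs)):
--         names = [n for (dd, n) in pairs if dd == d]
--         out[d] = {n: names.count(n) for n in sorted(set(names))}
--     return out
-- ===== Notes on version B (the rewrite author's own statement) =====
-- stated objective: alternative
-- what changed: A incrementally updates nested defaultdict counters and then sorts both levels; B extracts a flat (date, name) pair list once and builds the nested result directly with sorted(set(...)) comprehensions and list.count, with no incremental dictionaries.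
import Mathlib
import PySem

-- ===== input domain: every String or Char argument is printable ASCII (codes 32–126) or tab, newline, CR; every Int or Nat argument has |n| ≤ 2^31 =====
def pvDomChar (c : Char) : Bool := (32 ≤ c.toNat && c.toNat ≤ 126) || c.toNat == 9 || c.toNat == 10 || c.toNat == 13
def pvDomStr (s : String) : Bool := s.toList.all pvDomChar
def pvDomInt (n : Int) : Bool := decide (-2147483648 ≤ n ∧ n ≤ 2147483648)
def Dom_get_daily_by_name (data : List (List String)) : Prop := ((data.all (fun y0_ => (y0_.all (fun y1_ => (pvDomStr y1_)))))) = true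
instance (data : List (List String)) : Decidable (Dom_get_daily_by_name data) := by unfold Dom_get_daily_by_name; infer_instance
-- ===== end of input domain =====

-- B replaces A's incrementally-updated nested defaultdicts by a flat (date, name) pair list consumed with
-- sorted(set(...)) comprehensions and list.count; alternative decomposition, not claimed faster.

-- ===== PORT A =====
-- 'row[2] not in ("", None)' is ported as a ≠ "" test on row[2] (rows hold strings, never None);
-- the '_ => d' arm marks rows where Python's unpacking raises ValueError — excluded by Pre_.
def get_daily_by_name (data : List (List String)) : List (String × List (String × Int)) :=
  let data := data.filter (fun row => decide (2 < row.length) && !((PySem.List.pyGet? row 2).getD "" == ""))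
  let dnc : PySem.Dict String (PySem.Dict String Int) :=
    data.foldl (fun d row =>
      match row with
      | [result, name, date] =>
          if result ≠ "" then d.modify date PySem.Dict.empty (fun inner => inner.modify name 0 (· + 1)) else d
      | _ => d)
      PySem.Dict.empty
  (PySem.List.sorted dnc.items (fun p => p.1)).map (fun p =>
    (p.1, (PySem.List.sorted p.2.items (fun q => q.1)).map (fun q => (q.1, q.2))))

-- ===== PORT B =====
-- 'result, name, date = row': some triple iff the row has exactly three entries (none = Python's ValueError, outside Pre_)
def pvUnpack3 (row : List String) : Option (String × String × String) :=
  if h : row.length = 3 then some (row[0]'(by omega), row[1]'(by omega), row[2]'(by omega)) else none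

def get_daily_by_name_alt (data : List (List String)) : List (String × List (String × Int)) :=
  let rows := data.filter (fun row => decide (2 < row.length) && !((PySem.List.pyGet? row 2).getD "" == ""))
  let pairs : List (String × String) :=
    rows.foldl (fun acc row =>
      match pvUnpack3 row with
      | some (result, name, date) => if result ≠ "" then acc ++ [(date, name)] else acc
      | none => acc) []
  (PySem.List.sorted (PySem.Set.ofList (pairs.map (fun p => p.1))) (fun x => x)).map (fun d =>
    let names := (pairs.filter (fun p => p.1 == d)).map (fun p => p.2)
    (d, (PySem.List.sorted (PySem.Set.ofList names) (fun x => x)).map (fun n => (n, (names.count n : Int)))))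

-- ===== PRECONDITION & SPEC =====
-- Pre_ excludes exactly the rows on which Python A raises ValueError: a row of length > 3 whose third
-- entry is non-empty passes A's filter but fails the 3-way unpacking (B raises there too).
def Pre_get_daily_by_name (data : List (List String)) : Prop :=
  ∀ row ∈ data, 3 < row.length → PySem.List.pyGet? row 2 = some ""
instance (data : List (List String)) : Decidable (Pre_get_daily_by_name data) := by unfold Pre_get_daily_by_name; infer_instance
def pvWitness_get_daily_by_name : List (List String) :=
  [["x", "alice", "d1"], ["", "bob", "d1"], ["y", "alice", "d1"], ["z", "bob", "d2"], ["w", "bob"]]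
def Spec_get_daily_by_name (data : List (List String)) (out : List (String × List (String × Int))) : Prop := out = get_daily_by_name_alt data
instance (data : List (List String)) (out : List (String × List (String × Int))) : Decidable (Spec_get_daily_by_name data out) := by unfold Spec_get_daily_by_name; infer_instance

-- ===== CLAIM (what is proved, stated in full; the proofs are below) =====
def Claim_equal_get_daily_by_name : Prop := ∀ (data : List (List String)), Dom_get_daily_by_name data → Pre_get_daily_by_name data → Spec_get_daily_by_name data (get_daily_by_name data)

-- ===== LEMMAS AND PROOFS =====

-- the (date, name) pairs contributed by a row list (rows where unpacking would fail contribute nothing)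
def pvPairsOf (rows : List (List String)) : List (String × String) :=
  rows.flatMap (fun row =>
    match row with
    | [result, name, date] => if result ≠ "" then [(date, name)] else []
    | _ => [])

-- A's dict-updating step, over an already-extracted pair
def pvDStep (d : PySem.Dict String (PySem.Dict String Int)) (p : String × String) :
    PySem.Dict String (PySem.Dict String Int) :=
  d.modify p.1 PySem.Dict.empty (fun inner => inner.modify p.2 0 (· + 1))

theorem pvPairs_foldl (rows : List (List String)) (acc : List (String × String)) :
    rows.foldl (fun acc row =>
      match pvUnpack3 row with
      | some (result, name, date) => if result ≠ "" then acc ++ [(date, name)] else acc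
      | none => acc) acc = acc ++ pvPairsOf rows := by
  induction rows generalizing acc with
  | nil => simp [pvPairsOf]
  | cons row rows ih =>
    simp only [List.foldl_cons, ih]
    rcases row with _ | ⟨a, _ | ⟨b, _ | ⟨c, _ | ⟨e, t⟩⟩⟩⟩
    · simp [pvPairsOf, pvUnpack3]
    · simp [pvPairsOf, pvUnpack3]
    · simp [pvPairsOf, pvUnpack3]
    · simp only [pvPairsOf, pvUnpack3, List.flatMap_cons]
      split_ifs <;> simp_all
    · simp [pvPairsOf, pvUnpack3]

theorem pvDict_foldl (rows : List (List String)) (d : PySem.Dict String (PySem.Dict String Int)) :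
    rows.foldl (fun d row =>
      match row with
      | [result, name, date] =>
          if result ≠ "" then d.modify date PySem.Dict.empty (fun inner => inner.modify name 0 (· + 1)) else d
      | _ => d) d = (pvPairsOf rows).foldl pvDStep d := by
  induction rows generalizing d with
  | nil => simp [pvPairsOf]
  | cons row rows ih =>
    rcases row with _ | ⟨a, _ | ⟨b, _ | ⟨c, _ | ⟨e, t⟩⟩⟩⟩ <;>
      simp only [pvPairsOf, List.foldl_cons, List.flatMap_cons, ih] <;>
      first
        | (split_ifs <;> simp [pvDStep])
        | simp

theorem pvGetD_foldl (P : List (String × String)) (d : PySem.Dict String (PySem.Dict String Int)) (dt : String) :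
    (P.foldl pvDStep d).getD dt PySem.Dict.empty =
      ((P.filter (fun p => p.1 == dt)).map (fun p => p.2)).foldl
        (fun inner n => inner.modify n 0 (· + 1)) (d.getD dt PySem.Dict.empty) := by
  induction P generalizing d with
  | nil => simp
  | cons p P ih =>
    simp only [List.foldl_cons, ih, List.filter_cons]
    by_cases h : p.1 = dt
    · simp [pvDStep, h]
    · have h' : ¬ (p.1 == dt) = true := by simpa using h
      have h2 : ¬ dt = p.1 := fun hh => h hh.symm
      simp [pvDStep, h', PySem.Dict.getD_modify, h2]

theorem pvKeys_foldl (P : List (String × String)) :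
    (P.foldl pvDStep PySem.Dict.empty).keys = PySem.Set.ofList (P.map (fun p => p.1)) := by
  unfold pvDStep
  have h := PySem.Dict.keys_foldl_modify_key P (fun p => p.1) PySem.Dict.empty
      (fun _ p => fun inner : PySem.Dict String Int => inner.modify p.2 0 (· + 1)) PySem.Dict.empty
  exact h.trans (by rw [PySem.Dict.keys_empty, PySem.Set.update_nil_left])

-- sorting a (key, value) list with distinct keys by key = sorting the key set, then pairing
theorem pvSorted_ofList_map {ν : Type} (xs : List String) (g : String → ν) :
    PySem.List.sorted ((PySem.Set.ofList xs).map (fun k => (k, g k))) (fun p => p.1) =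
      (PySem.List.sorted (PySem.Set.ofList xs) (fun x => x)).map (fun k => (k, g k)) := by
  apply PySem.List.sorted_eq_of_perm_of_pairwise_lt
  · exact (PySem.List.sorted_perm _ _ _).map _
  · rw [List.pairwise_map]
    exact PySem.List.sorted_ofList_pairwise_lt xs

theorem get_daily_by_name_eq_alt (data : List (List String)) :
    get_daily_by_name data = get_daily_by_name_alt data := by
  unfold get_daily_by_name get_daily_by_name_alt
  simp only [pvDict_foldl, pvPairs_foldl, List.nil_append]
  set P := pvPairsOf (data.filter (fun row => decide (2 < row.length) && !((PySem.List.pyGet? row 2).getD "" == ""))) with hP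
  set D := P.foldl pvDStep PySem.Dict.empty with hD
  have hkeys : D.keys = PySem.Set.ofList (P.map (fun p => p.1)) := pvKeys_foldl P
  have hnd : D.keys.Nodup := by rw [hkeys]; exact PySem.Set.nodup_ofList _
  have hitems : D.items = (PySem.Set.ofList (P.map (fun p => p.1))).map
      (fun k => (k, D.getD k PySem.Dict.empty)) := by
    rw [PySem.Dict.items_eq_map_keys D hnd PySem.Dict.empty, hkeys]
  rw [hitems, pvSorted_ofList_map, List.map_map]
  apply List.map_congr_left
  intro dt _
  simp only [Function.comp]
  refine congrArg (fun l => (dt, l)) ?_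
  have hinner : D.getD dt PySem.Dict.empty =
      PySem.Dict.counter ((P.filter (fun p => p.1 == dt)).map (fun p => p.2)) := by
    rw [hD, pvGetD_foldl, PySem.Dict.getD_empty, PySem.Dict.counter_eq_foldl]
  rw [hinner, PySem.Dict.items_counter, pvSorted_ofList_map, List.map_map]
  simp [Function.comp]

-- ===== VERDICT (by name: the statement is the Claim_ definition above) =====
theorem get_daily_by_name_spec : Claim_equal_get_daily_by_name := by
  intro data _ _
  unfold Spec_get_daily_by_name
  exact get_daily_by_name_eq_alt data
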